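-- pv_equiv track=rewrite | github.com/Catelemmon/imageSpider | anjieSpider/spiders/baiduimage.py | decrypt_hd_img_addr
-- ===== SOURCE A (Python) =====
-- def decrypt_hd_img_addr(url): # 高清图片解密函数
--     symbol_table = { # 解密符号表
--         '_z2C$q': ':',
--         '_z&e3B': '.',
--         'AzdH3F': '/'
--     }
--     char_table = { # 解密字符表
--         'w': 'a',
--         'k': 'b',
--         'v': 'c',
--         '1': 'd',
--         'j': 'e',
--         'u': 'f',
--         '2': 'g',
--         'i': 'h',
--         't': 'i',
--         '3': 'j',
--         'h': 'k',
--         's': 'l',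
--         '4': 'm',
--         'g': 'n',
--         '5': 'o',
--         'r': 'p',
--         'q': 'q',
--         '6': 'r',
--         'f': 's',
--         'p': 't',
--         '7': 'u',
--         'e': 'v',
--         'o': 'w',
--         '8': '1',
--         'd': '2',
--         'n': '3',
--         '9': '4',
--         'c': '5',
--         'm': '6',
--         '0': '7',
--         'b': '8',
--         'l': '9',
--         'a': '0',
--     }
--     # str 的translate方法需要用单个字符的十进制unicode编码作为key
--     # value 中的数字会被当成十进制unicode编码转换成字符
--     # 也可以直接用字符串作为value
--     char_table = {ord(key): ord(value) for key, value in char_table.items()}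
--     # 先替换字符串
--     for key, value in symbol_table.items():
--         url = url.replace(key, value)
--     # 再替换剩下的字符
--     return url.translate(char_table)
-- ===== SOURCE B (Python) =====
-- def decrypt_hd_img_addr(url):  # single left-to-right scan instead of three replace passes + translate
--     symbols = (('_z2C$q', ':'), ('_z&e3B', '.'), ('AzdH3F', '/'))
--     char_table = {
--         'w': 'a', 'k': 'b', 'v': 'c', '1': 'd', 'j': 'e', 'u': 'f', '2': 'g',
--         'i': 'h', 't': 'i', '3': 'j', 'h': 'k', 's': 'l', '4': 'm', 'g': 'n',
--         '5': 'o', 'r': 'p', 'q': 'q', '6': 'r', 'f': 's', 'p': 't', '7': 'u',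
--         'e': 'v', 'o': 'w', '8': '1', 'd': '2', 'n': '3', '9': '4', 'c': '5',
--         'm': '6', '0': '7', 'b': '8', 'l': '9', 'a': '0',
--     }
--     pieces = []
--     i = 0
--     n = len(url)
--     while i < n:
--         for tok, rep in symbols:
--             if url[i:i + 6] == tok:
--                 pieces.append(rep)
--                 i += 6
--                 break
--         else:
--             c = url[i]
--             pieces.append(char_table.get(c, c))
--             i += 1
--     return ''.join(pieces)
-- ===== Notes on version B (the rewrite author's own statement) =====
-- stated objective: alternative
-- what changed: Replaces A's three sequential whole-string str.replace passes followed by a translate pass with a single left-to-right scan that at each position consumes either one 6-char symbol token or one table-mapped character (the tokens are mutually non-overlapping, so one greedy pass reproduces the multi-pass result).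
import Mathlib
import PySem

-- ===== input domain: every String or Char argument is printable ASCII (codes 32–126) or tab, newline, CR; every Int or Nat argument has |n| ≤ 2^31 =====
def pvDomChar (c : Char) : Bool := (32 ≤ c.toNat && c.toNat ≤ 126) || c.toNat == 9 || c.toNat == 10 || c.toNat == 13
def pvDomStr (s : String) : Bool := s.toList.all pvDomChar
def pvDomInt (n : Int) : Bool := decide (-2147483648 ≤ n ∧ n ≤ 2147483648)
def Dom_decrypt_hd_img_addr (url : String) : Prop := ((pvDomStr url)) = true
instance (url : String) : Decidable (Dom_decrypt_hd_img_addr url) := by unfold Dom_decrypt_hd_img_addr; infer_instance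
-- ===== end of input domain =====

-- B replaces A's three sequential str.replace passes plus a translate pass by ONE left-to-right
-- scan that at each position either consumes a whole 6-char symbol token or maps one character.

-- ===== PORT A =====
-- A's char_table as a list of (key, value) char pairs, in A's insertion order.
def pvCharPairs : List (Char × Char) :=
  [('w','a'),('k','b'),('v','c'),('1','d'),('j','e'),('u','f'),('2','g'),
   ('i','h'),('t','i'),('3','j'),('h','k'),('s','l'),('4','m'),('g','n'),
   ('5','o'),('r','p'),('q','q'),('6','r'),('f','s'),('p','t'),('7','u'),
   ('e','v'),('o','w'),('8','1'),('d','2'),('n','3'),('9','4'),('c','5'),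
   ('m','6'),('0','7'),('b','8'),('l','9'),('a','0')]

-- char_table = {ord(key): ord(value) for key, value in char_table.items()}
def pvIntTable : PySem.Dict Int Int :=
  PySem.Dict.ofList (pvCharPairs.map (fun p => ((p.1.toNat : Int), (p.2.toNat : Int))))

-- str.translate with an int→int table: each code point is looked up and mapped through chr;
-- hand port (no PySem primitive), exact because every value in the table is a valid code point.
def pvTranslateChar (c : Char) : Char :=
  match pvIntTable.get? ((c.toNat : Int)) with
  | some v => Char.ofNat v.toNat
  | none => c

def decrypt_hd_img_addr (url : String) : String :=
  let symbolTable : PySem.Dict String String :=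
    PySem.Dict.ofList [("_z2C$q", ":"), ("_z&e3B", "."), ("AzdH3F", "/")]
  -- for key, value in symbol_table.items(): url = url.replace(key, value)
  let url2 := symbolTable.items.foldl (fun u kv => PySem.Str.replace u kv.1 kv.2) url
  -- return url.translate(char_table)
  String.ofList (url2.toList.map pvTranslateChar)

-- ===== PORT B =====
def pvTok1 : List Char := ['_', 'z', '2', 'C', '$', 'q']
def pvTok2 : List Char := ['_', 'z', '&', 'e', '3', 'B']
def pvTok3 : List Char := ['A', 'z', 'd', 'H', '3', 'F']

def pvCharDict : PySem.Dict Char Char := PySem.Dict.ofList pvCharPairs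

-- Source B's while loop over i: compare the 6-char slice at i with each token (url[i:i+6] == tok),
-- else emit char_table.get(c, c); the remaining suffix url[i:] is the recursion argument.
def pvScan (tbl : PySem.Dict Char Char) : List Char → List Char
  | [] => []
  | c :: t =>
    if List.take 6 (c :: t) = pvTok1 then ':' :: pvScan tbl (List.drop 5 t)
    else if List.take 6 (c :: t) = pvTok2 then '.' :: pvScan tbl (List.drop 5 t)
    else if List.take 6 (c :: t) = pvTok3 then '/' :: pvScan tbl (List.drop 5 t)
    else tbl.getD c c :: pvScan tbl t
termination_by s => s.length
decreasing_by all_goals simp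

def decrypt_hd_img_addr_alt (url : String) : String :=
  String.ofList (pvScan pvCharDict url.toList)

-- ===== PRECONDITION & SPEC =====
def Spec_decrypt_hd_img_addr (url : String) (out : String) : Prop := out = decrypt_hd_img_addr_alt url
instance (url : String) (out : String) : Decidable (Spec_decrypt_hd_img_addr url out) := by unfold Spec_decrypt_hd_img_addr; infer_instance

-- ===== CLAIM (what is proved, stated in full; the proofs are below) =====
def Claim_equal_decrypt_hd_img_addr : Prop := ∀ (url : String), Dom_decrypt_hd_img_addr url → Spec_decrypt_hd_img_addr url (decrypt_hd_img_addr url)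

-- ===== LEMMAS AND PROOFS =====

-- Characterization of PySem.Chars.replace (old ≠ []): the natural head recursion.
def repTok (tok new : List Char) : List Char → List Char
  | [] => []
  | c :: t =>
    if tok.isPrefixOf (c :: t) then new ++ repTok tok new (List.drop (tok.length - 1) t)
    else c :: repTok tok new t
termination_by s => s.length
decreasing_by
  · simp
  · simp

theorem go_spec (tok new : List Char) (htok : tok ≠ []) :
    ∀ fuel s acc, s.length ≤ fuel →
      PySem.Chars.replace.go tok new fuel s acc = acc.reverse ++ repTok tok new s := by
  have h1 : 1 ≤ tok.length := by cases tok <;> simp_all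
  intro fuel
  induction fuel with
  | zero =>
    intro s acc h
    have : s = [] := by cases s <;> simp_all
    subst this
    simp [PySem.Chars.replace.go, repTok]
  | succ n ih =>
    intro s acc h
    cases s with
    | nil => simp [PySem.Chars.replace.go, repTok]
    | cons c t =>
      rw [PySem.Chars.replace.go]
      by_cases hp : tok.isPrefixOf (c :: t)
      · simp only [hp, if_true]
        rw [ih _ _ (by simp at h ⊢; omega)]
        rw [repTok]
        simp [hp]
        obtain ⟨k, hk⟩ : ∃ k, tok.length = k + 1 := ⟨tok.length - 1, by omega⟩
        simp [hk]
      · simp only [hp]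
        rw [ih t (c :: acc) (by simp at h ⊢; omega)]
        rw [repTok]
        simp [hp]

theorem replace_eq_repTok (tok new s : List Char) (htok : tok ≠ []) :
    PySem.Chars.replace s tok new = repTok tok new s := by
  rw [PySem.Chars.replace, if_neg (by simp [htok])]
  exact go_spec tok new htok s.length s [] le_rfl

theorem repTok_cons_neg (tok new : List Char) (c : Char) (t : List Char)
    (h : tok.isPrefixOf (c :: t) = false) :
    repTok tok new (c :: t) = c :: repTok tok new t := by
  rw [repTok]; simp [h]

theorem notPrefix_head (a : Char) (as : List Char) (b : Char) (bs : List Char) (h : a ≠ b) :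
    (a :: as).isPrefixOf (b :: bs) = false := by
  simp [List.isPrefixOf, h]

-- take k of repTok is take k of s unless a replacement char appears in it
theorem take_repTok (tok : List Char) (r : Char) :
    ∀ s k, List.take k (repTok tok [r] s) = List.take k s ∨ r ∈ List.take k (repTok tok [r] s) := by
  intro s
  induction s using repTok.induct (tok := tok) with
  | case1 => intro k; left; simp [repTok]
  | case2 c t hp ih =>
    intro k
    rw [repTok, if_pos hp]
    cases k with
    | zero => left; simp
    | succ k => right; simp
  | case3 c t hp ih =>
    intro k
    rw [repTok, if_neg hp]
    cases k with
    | zero => left; simp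
    | succ k =>
      rcases ih k with h | h
      · left; simp [h]
      · right; simp [h]

-- a block u not containing the replacement char: a prefix of the replaced string was a prefix already
theorem prefix_repTok (tok : List Char) (r : Char) (u s : List Char)
    (hru : r ∉ u) (h : u <+: repTok tok [r] s) : u <+: s := by
  rcases take_repTok tok r s u.length with ht | ht
  · rw [List.prefix_iff_eq_take] at h ⊢
    rw [← ht, ← h]
  · rw [List.prefix_iff_eq_take] at h
    rw [← h] at ht
    exact absurd ht hru

theorem skip_t1_t2 (rest : List Char) (h0 : pvTok1.isPrefixOf (pvTok2 ++ rest) = false) :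
    repTok pvTok1 [':'] (pvTok2 ++ rest) = pvTok2 ++ repTok pvTok1 [':'] rest := by
  simp only [pvTok1, pvTok2, List.cons_append, List.nil_append] at *
  rw [repTok_cons_neg _ _ _ _ h0,
      repTok_cons_neg _ _ _ _ (notPrefix_head _ _ _ _ (by decide)),
      repTok_cons_neg _ _ _ _ (notPrefix_head _ _ _ _ (by decide)),
      repTok_cons_neg _ _ _ _ (notPrefix_head _ _ _ _ (by decide)),
      repTok_cons_neg _ _ _ _ (notPrefix_head _ _ _ _ (by decide)),
      repTok_cons_neg _ _ _ _ (notPrefix_head _ _ _ _ (by decide))]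

theorem skip_t1_t3 (rest : List Char) :
    repTok pvTok1 [':'] (pvTok3 ++ rest) = pvTok3 ++ repTok pvTok1 [':'] rest := by
  simp only [pvTok1, pvTok3, List.cons_append, List.nil_append]
  rw [repTok_cons_neg _ _ _ _ (notPrefix_head _ _ _ _ (by decide)),
      repTok_cons_neg _ _ _ _ (notPrefix_head _ _ _ _ (by decide)),
      repTok_cons_neg _ _ _ _ (notPrefix_head _ _ _ _ (by decide)),
      repTok_cons_neg _ _ _ _ (notPrefix_head _ _ _ _ (by decide)),
      repTok_cons_neg _ _ _ _ (notPrefix_head _ _ _ _ (by decide)),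
      repTok_cons_neg _ _ _ _ (notPrefix_head _ _ _ _ (by decide))]

theorem skip_t2_t3 (rest : List Char) :
    repTok pvTok2 ['.'] (pvTok3 ++ rest) = pvTok3 ++ repTok pvTok2 ['.'] rest := by
  simp only [pvTok2, pvTok3, List.cons_append, List.nil_append]
  rw [repTok_cons_neg _ _ _ _ (notPrefix_head _ _ _ _ (by decide)),
      repTok_cons_neg _ _ _ _ (notPrefix_head _ _ _ _ (by decide)),
      repTok_cons_neg _ _ _ _ (notPrefix_head _ _ _ _ (by decide)),
      repTok_cons_neg _ _ _ _ (notPrefix_head _ _ _ _ (by decide)),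
      repTok_cons_neg _ _ _ _ (notPrefix_head _ _ _ _ (by decide)),
      repTok_cons_neg _ _ _ _ (notPrefix_head _ _ _ _ (by decide))]

-- replacing a token that sits at the front
theorem repTok_self (tok : List Char) (r : Char) (rest : List Char)
    (h : tok = pvTok1 ∨ tok = pvTok2 ∨ tok = pvTok3) :
    repTok tok [r] (tok ++ rest) = r :: repTok tok [r] rest := by
  rcases h with h | h | h <;> subst h <;>
  · rw [repTok.eq_def]
    simp [pvTok1, pvTok2, pvTok3, List.isPrefixOf]

theorem ord_beq (k c : Char) : (((k.toNat : Int)) == ((c.toNat : Int))) = (k == c) := by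
  by_cases h : k = c
  · simp [h]
  · have : k.toNat ≠ c.toNat := by
      intro hn
      apply h
      unfold Char.toNat at hn
      exact Char.ext (by exact_mod_cast UInt32.toNat_inj.mp hn)
    simp [h, this]

-- looking up ord c in the ord-keyed table is looking up c in the char-keyed table
theorem get?_map_ord (ps : List (Char × Char)) (c : Char) :
    (PySem.Dict.mk (ps.map (fun p => ((p.1.toNat : Int), (p.2.toNat : Int))))).get? ((c.toNat : Int))
      = ((PySem.Dict.mk ps).get? c).map (fun v => ((v.toNat : Int))) := by
  induction ps with
  | nil => simp [PySem.Dict.get?]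
  | cons p t ih =>
    obtain ⟨k, v⟩ := p
    simp only [List.map_cons]
    rw [PySem.Dict.get?_mk_cons, PySem.Dict.get?_mk_cons, ord_beq]
    by_cases h : (k == c)
    · simp [h]
    · simp only [h] at *
      simpa using ih

theorem pvIntTable_mk :
    pvIntTable = PySem.Dict.mk (pvCharPairs.map (fun p => ((p.1.toNat : Int), (p.2.toNat : Int)))) := by
  decide

theorem pvCharDict_mk : PySem.Dict.ofList pvCharPairs = PySem.Dict.mk pvCharPairs := by decide

theorem tr_eq (c : Char) :
    pvTranslateChar c = (PySem.Dict.ofList pvCharPairs).getD c c := by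
  rw [pvTranslateChar, pvIntTable_mk, get?_map_ord, pvCharDict_mk, PySem.Dict.getD_eq_get?_getD]
  cases h : (PySem.Dict.mk pvCharPairs).get? c with
  | none => simp
  | some v =>
    simp only [Option.map_some, Option.getD_some]
    have hv : Char.ofNat v.toNat = v := Char.ofNat_toNat v
    simp [hv]

theorem take6_eq_iff (tok s : List Char) (htok : tok.length = 6) :
    List.take 6 s = tok ↔ tok <+: s := by
  rw [List.prefix_iff_eq_take, htok, eq_comm]

theorem np2_colon (X : List Char) : pvTok2.isPrefixOf (':' :: X) = false := by
  simp only [pvTok2]; exact notPrefix_head _ _ _ _ (by decide)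
theorem np3_colon (X : List Char) : pvTok3.isPrefixOf (':' :: X) = false := by
  simp only [pvTok3]; exact notPrefix_head _ _ _ _ (by decide)
theorem np3_dot (X : List Char) : pvTok3.isPrefixOf ('.' :: X) = false := by
  simp only [pvTok3]; exact notPrefix_head _ _ _ _ (by decide)

theorem main_eq (s : List Char) :
    List.map pvTranslateChar
        (repTok pvTok3 ['/'] (repTok pvTok2 ['.'] (repTok pvTok1 [':'] s)))
      = pvScan pvCharDict s := by
  induction s using pvScan.induct with
  | case1 => simp [repTok, pvScan]
  | case2 c t h ih =>
    have hs : pvTok1 ++ List.drop 5 t = c :: t := by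
      rw [← h]; exact List.take_append_drop 6 (c :: t)
    rw [pvScan, if_pos h, ← hs,
        repTok_self _ _ _ (Or.inl rfl),
        repTok_cons_neg _ _ _ _ (np2_colon _),
        repTok_cons_neg _ _ _ _ (np3_colon _),
        List.map_cons, ih]
    rfl
  | case3 c t h1 h2 ih =>
    have hs : pvTok2 ++ List.drop 5 t = c :: t := by
      rw [← h2]; exact List.take_append_drop 6 (c :: t)
    have h0 : pvTok1.isPrefixOf (pvTok2 ++ List.drop 5 t) = false := by
      rw [hs]
      rw [Bool.eq_false_iff]
      intro hb
      exact h1 ((take6_eq_iff _ _ (by decide)).mpr (List.isPrefixOf_iff_prefix.mp hb))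
    rw [pvScan, if_neg h1, if_pos h2]
    rw [← hs,
        skip_t1_t2 _ h0,
        repTok_self _ _ _ (Or.inr (Or.inl rfl)),
        repTok_cons_neg _ _ _ _ (np3_dot _),
        List.map_cons, ih]
    rfl
  | case4 c t h1 h2 h3 ih =>
    have hs : pvTok3 ++ List.drop 5 t = c :: t := by
      rw [← h3]; exact List.take_append_drop 6 (c :: t)
    rw [pvScan, if_neg h1, if_neg h2, if_pos h3]
    rw [← hs,
        skip_t1_t3,
        skip_t2_t3,
        repTok_self _ _ _ (Or.inr (Or.inr rfl)),
        List.map_cons, ih]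
    rfl
  | case5 c t h1 h2 h3 ih =>
    have k1 : pvTok1.isPrefixOf (c :: t) = false := by
      rw [Bool.eq_false_iff]
      intro hb
      exact h1 ((take6_eq_iff _ _ (by decide)).mpr (List.isPrefixOf_iff_prefix.mp hb))
    have e1 : repTok pvTok1 [':'] (c :: t) = c :: repTok pvTok1 [':'] t :=
      repTok_cons_neg _ _ _ _ k1
    have k2 : pvTok2.isPrefixOf (c :: repTok pvTok1 [':'] t) = false := by
      rw [Bool.eq_false_iff]
      intro hb
      have hpre : pvTok2 <+: repTok pvTok1 [':'] (c :: t) := by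
        rw [e1]; exact List.isPrefixOf_iff_prefix.mp hb
      have := prefix_repTok _ _ _ _ (by decide) hpre
      exact h2 ((take6_eq_iff _ _ (by decide)).mpr this)
    have e2 : repTok pvTok2 ['.'] (repTok pvTok1 [':'] (c :: t))
        = c :: repTok pvTok2 ['.'] (repTok pvTok1 [':'] t) := by
      rw [e1]; exact repTok_cons_neg _ _ _ _ k2
    have k3 : pvTok3.isPrefixOf (c :: repTok pvTok2 ['.'] (repTok pvTok1 [':'] t)) = false := by
      rw [Bool.eq_false_iff]
      intro hb
      have hpre : pvTok3 <+: repTok pvTok2 ['.'] (repTok pvTok1 [':'] (c :: t)) := by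
        rw [e2]; exact List.isPrefixOf_iff_prefix.mp hb
      have := prefix_repTok _ _ _ _ (by decide) (prefix_repTok _ _ _ _ (by decide) hpre)
      exact h3 ((take6_eq_iff _ _ (by decide)).mpr this)
    rw [pvScan, if_neg h1, if_neg h2, if_neg h3]
    rw [e2, repTok_cons_neg _ _ _ _ k3, List.map_cons, ih, tr_eq]
    rfl

theorem A_unfold (url : String) :
    decrypt_hd_img_addr url
      = String.ofList (List.map pvTranslateChar
          (PySem.Chars.replace (PySem.Chars.replace (PySem.Chars.replace url.toList pvTok1 [':'])
            pvTok2 ['.']) pvTok3 ['/'])) := by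
  unfold decrypt_hd_img_addr
  dsimp only
  have hitems : (PySem.Dict.ofList [("_z2C$q", ":"), ("_z&e3B", "."), ("AzdH3F", "/")] :
      PySem.Dict String String).items = [("_z2C$q", ":"), ("_z&e3B", "."), ("AzdH3F", "/")] := by
    decide
  rw [hitems]
  simp only [List.foldl_cons, List.foldl_nil, PySem.Str.replace]
  rw [show ("_z2C$q".toList = pvTok1) from by decide,
      show ("_z&e3B".toList = pvTok2) from by decide,
      show ("AzdH3F".toList = pvTok3) from by decide,
      show ((":").toList = [':']) from by decide,
      show ((".").toList = ['.']) from by decide,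
      show (("/").toList = ['/']) from by decide]
  simp

-- ===== VERDICT (by name: the statement is the Claim_ definition above) =====
theorem decrypt_hd_img_addr_spec : Claim_equal_decrypt_hd_img_addr := by
  intro url _
  unfold Spec_decrypt_hd_img_addr decrypt_hd_img_addr_alt
  rw [A_unfold,
      replace_eq_repTok _ _ _ (by decide),
      replace_eq_repTok _ _ _ (by decide),
      replace_eq_repTok _ _ _ (by decide)]
  exact congrArg String.ofList (main_eq url.toList)
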